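-- pv_equiv track=rewrite | github.com/svshyam91/geeksforgeeks | the_even_array.py | the_even_array
-- ===== SOURCE A (Python) =====
-- def the_even_array(s):
--     auto_next = 0
--     l = len(s)
--     count=0
--     for i in range(l):
--         if s[i] == 'O' and auto_next == 0:
--             s=s.replace('O','E',1)
--             auto_next=1
--             count+=1
--         elif s[i] == 'O' and auto_next == 1:
--             s=s.replace('O','E',1)
--             auto_next=1
--         else:
--             auto_next=0
--     return count
-- ===== SOURCE B (Python) =====
-- def the_even_array(s):
--     # Stage 1: blank out every non-'O' character; Stage 2: whitespace-split, so each
--     # token is one maximal run of 'O'; the answer is the number of tokens.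
--     masked = ''.join(c if c == 'O' else ' ' for c in s)
--     return len(masked.split())
-- ===== Notes on version B (the rewrite author's own statement) =====
-- stated objective: faster
-- what changed: Replaced the index loop that repeatedly rebuilds the string with s.replace('O','E',1) (a linear rescan per 'O') by two staged passes: blank out every non-'O' character, then whitespace-split so each token is one maximal run of 'O' and return the token count.
import Mathlib
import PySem

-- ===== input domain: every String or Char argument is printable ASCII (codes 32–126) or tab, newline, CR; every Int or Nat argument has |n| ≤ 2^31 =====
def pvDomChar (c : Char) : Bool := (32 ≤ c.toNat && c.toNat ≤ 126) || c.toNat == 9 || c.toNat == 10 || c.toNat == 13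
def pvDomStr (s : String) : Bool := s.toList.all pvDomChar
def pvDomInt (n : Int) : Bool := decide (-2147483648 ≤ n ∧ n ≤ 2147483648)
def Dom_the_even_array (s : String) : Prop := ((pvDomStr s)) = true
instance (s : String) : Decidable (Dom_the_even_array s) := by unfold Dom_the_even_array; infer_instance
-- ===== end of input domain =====

-- B replaces A's quadratic rebuild-the-string loop by two staged passes: blank out
-- every non-'O' character, then whitespace-split and count the tokens (objective: faster).

-- ===== PORT A =====
-- s.replace('O','E',1) for the single-character pattern 'O' = replace the first 'O' with 'E'
-- (exact: Python's count-limited replace with a 1-char old string).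
def pvReplaceFirstO : List Char → List Char
  | [] => []
  | c :: cs => if c = 'O' then 'E' :: cs else c :: pvReplaceFirstO cs

-- one iteration of A's for-loop; state = (current string, auto_next, count)
def pvStepA (st : List Char × Int × Int) (i : Int) : List Char × Int × Int :=
  match PySem.List.pyGet? st.1 i with
  | none => st   -- unreachable: i < len(s) and replace preserves length (Python would raise)
  | some c =>
    if c = 'O' ∧ st.2.1 = 0 then (pvReplaceFirstO st.1, 1, st.2.2 + 1)
    else if c = 'O' ∧ st.2.1 = 1 then (pvReplaceFirstO st.1, 1, st.2.2)
    else (st.1, 0, st.2.2)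

def the_even_array (s : String) : Int :=
  ((PySem.List.pyRange 0 (PySem.Str.len s) 1).foldl pvStepA (s.toList, 0, 0)).2.2

-- ===== PORT B =====
-- masked = ''.join(c if c == 'O' else ' ' for c in s)
def pvMaskedB (s : String) : List Char := s.toList.map (fun c => if c = 'O' then c else ' ')

-- return len(masked.split())
def the_even_array_alt (s : String) : Int :=
  ((PySem.Chars.split₀ (pvMaskedB s)).length : Int)

-- ===== PRECONDITION & SPEC =====
def Spec_the_even_array (s : String) (out : Int) : Prop := out = the_even_array_alt s
instance (s : String) (out : Int) : Decidable (Spec_the_even_array s out) := by unfold Spec_the_even_array; infer_instance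

-- ===== CLAIM (what is proved, stated in full; the proofs are below) =====
def Claim_equal_the_even_array : Prop := ∀ (s : String), Dom_the_even_array s → Spec_the_even_array s (the_even_array s)

-- ===== LEMMAS AND PROOFS =====

-- number of maximal runs of 'O' in xs, given whether the previous char was 'O'
def pvRuns : List Char → Bool → Nat
  | [], _ => 0
  | c :: rest, prev =>
    if c = 'O' then (if prev then 0 else 1) + pvRuns rest true
    else pvRuns rest false

-- one iteration of a prev-flag scan; state = (count, previous char was 'O'); proof-internal
def pvStepB (st : Int × Bool) (c : Char) : Int × Bool :=
  ((if c = 'O' ∧ st.2 = false then st.1 + 1 else st.1), c = 'O')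

theorem pvFoldB_runs (xs : List Char) (k : Int) (prev : Bool) :
    (xs.foldl pvStepB (k, prev)).1 = k + (pvRuns xs prev : Int) := by
  induction xs generalizing k prev with
  | nil => simp [pvRuns]
  | cons c rest ih =>
    by_cases hc : c = 'O'
    · cases prev <;> simp [pvStepB, pvRuns, hc, ih] <;> ring
    · simp [pvStepB, pvRuns, hc, ih]

-- 'E'-masking of the already-visited prefix (A-side proof helper)
def pvMask (xs : List Char) : List Char := xs.map (fun c => if c = 'O' then 'E' else c)

theorem pvMask_no_O (xs : List Char) : 'O' ∉ pvMask xs := by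
  intro h
  simp only [pvMask, List.mem_map] at h
  obtain ⟨c, _, hc⟩ := h
  by_cases h' : c = 'O' <;> simp [h'] at hc

theorem pvReplaceFirstO_append (xs ys : List Char) (h : 'O' ∉ xs) :
    pvReplaceFirstO (xs ++ ys) = xs ++ pvReplaceFirstO ys := by
  induction xs with
  | nil => rfl
  | cons c cs ih =>
    simp only [List.mem_cons, not_or] at h
    have hc : ¬ c = 'O' := fun hc => h.1 hc.symm
    simp [pvReplaceFirstO, hc, ih h.2]

theorem pvMask_snoc (xs : List Char) (c : Char) :
    pvMask (xs ++ [c]) = pvMask xs ++ [if c = 'O' then 'E' else c] := by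
  simp [pvMask]

-- the loop invariant: after i iterations A's string is the masked prefix ++ untouched
-- suffix, auto_next mirrors the prev-flag, and count is the prev-flag scan's count
theorem pvInvariant (orig : List Char) (i : Nat) (hi : i ≤ orig.length) :
    (PySem.List.pyRange 0 i 1).foldl pvStepA (orig, 0, 0) =
      (pvMask (orig.take i) ++ orig.drop i,
       (if ((orig.take i).foldl pvStepB (0, false)).2 then 1 else 0),
       ((orig.take i).foldl pvStepB (0, false)).1) := by
  induction i with
  | zero => simp [pvMask]
  | succ n ih =>
    have hn : n ≤ orig.length := Nat.le_of_succ_le hi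
    have hlt : n < orig.length := hi
    have hsplit : PySem.List.pyRange 0 ((n + 1 : Nat) : Int) 1
        = PySem.List.pyRange 0 (n : Int) 1 ++ [(n : Int)] := by
      push_cast
      exact PySem.List.pyRange_one_succ_right (by positivity)
    rw [hsplit, List.foldl_append, ih hn]
    have htake : orig.take (n + 1) = orig.take n ++ [orig[n]] :=
      List.take_succ_eq_append_getElem hlt
    have hmasklen : (pvMask (orig.take n)).length = n := by
      simp [pvMask, List.length_take, Nat.min_eq_left hn]
    have hdrop : orig.drop n = orig[n] :: orig.drop (n + 1) :=
      (List.drop_eq_getElem_cons hlt)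
    -- the character A reads at index n is the original one
    have hget : PySem.List.pyGet? (pvMask (orig.take n) ++ orig.drop n) (n : Int)
        = some orig[n] := by
      rw [hdrop]
      have := PySem.List.pyGet?_append_length (pre := pvMask (orig.take n))
        (y := orig[n]) (ys := orig.drop (n + 1))
      rwa [hmasklen] at this
    rw [htake, List.foldl_append]
    set stB := (orig.take n).foldl pvStepB (0, false) with hstB
    simp only [List.foldl_cons, List.foldl_nil, pvStepA, hget]
    by_cases hO : orig[n] = 'O'
    · have hrepl : pvReplaceFirstO (pvMask (orig.take n) ++ orig.drop n)
          = pvMask (orig.take (n + 1)) ++ orig.drop (n + 1) := by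
        rw [pvReplaceFirstO_append _ _ (pvMask_no_O _), hdrop, htake, pvMask_snoc]
        simp [pvReplaceFirstO, hO]
      by_cases hprev : stB.2 = false
      · simp [hO, hprev, hrepl, pvStepB]
        rw [htake, hO]
      · simp only [Bool.not_eq_false] at hprev
        simp [hO, hprev, hrepl, pvStepB]
        rw [htake, hO]
    · have hkeep : pvMask (orig.take (n + 1)) ++ orig.drop (n + 1)
          = pvMask (orig.take n) ++ orig.drop n := by
        rw [htake, pvMask_snoc, if_neg hO, hdrop]
        simp
      simp [pvStepB, hO, hkeep]

-- B-side: split₀.go on a blanked string counts exactly the 'O'-runs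
theorem pvGo_runs (xs : List Char) (cur : List Char) (acc : List (List Char)) :
    (PySem.Chars.split₀.go (xs.map (fun c => if c = 'O' then c else ' ')) cur acc).length
      = acc.length + (if cur.isEmpty then 0 else 1) + pvRuns xs !cur.isEmpty := by
  induction xs generalizing cur acc with
  | nil =>
    by_cases h : cur.isEmpty <;> simp [PySem.Chars.split₀.go, h, pvRuns]
  | cons c rest ih =>
    by_cases hc : c = 'O'
    · subst hc
      simp only [List.map_cons, if_pos, PySem.Chars.split₀.go]
      rw [if_neg (by decide), ih]
      by_cases h : cur.isEmpty <;> simp [pvRuns, h] <;> omega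
    · have hm : (if c = 'O' then c else ' ') = ' ' := if_neg hc
      simp only [List.map_cons, hm, PySem.Chars.split₀.go]
      rw [if_pos (by decide)]
      by_cases h : cur.isEmpty
      · rw [if_pos h, ih]
        simp [pvRuns, hc, h]
      · rw [if_neg h, ih]
        simp [pvRuns, hc, h]

-- ===== VERDICT (by name: the statement is the Claim_ definition above) =====
theorem the_even_array_spec : Claim_equal_the_even_array := by
  intro s _
  unfold Spec_the_even_array the_even_array the_even_array_alt
  have hlen : PySem.Str.len s = ((s.toList.length : Nat) : Int) := by
    simp [PySem.Str.len_eq]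
  rw [hlen, pvInvariant s.toList s.toList.length (le_refl _)]
  simp only [List.take_length]
  rw [pvFoldB_runs]
  have hgo := pvGo_runs s.toList [] []
  have hB : PySem.Chars.split₀ (pvMaskedB s)
      = PySem.Chars.split₀.go (s.toList.map (fun c => if c = 'O' then c else ' ')) [] [] := by
    simp [PySem.Chars.split₀, pvMaskedB]
  rw [hB, hgo]
  simp
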